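-- pv_equiv track=rewrite | github.com/pypi-data/pypi-mirror-44 | packages/transportmaps/TransportMaps-2.0b3.tar.gz/TransportMaps-2.0b3/TransportMaps/XML/Parser.py | num_parser
-- ===== SOURCE A (Python) =====
-- def num_parser(nstr, d):
--     if nstr == '':
--         out = None
--     elif nstr[0] == 'd': # Format d-x or d+x
--         sp_plus = nstr.split('+')
--         sp = [ s.split('-') for s in sp_plus ]
--         out = 0
--         for s0 in sp:
--             if s0[0] == 'd':
--                 sub = d
--             else:
--                 sub = int(s0[0])
--             for s1 in s0[1:]:
--                 sub -= int(s1)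
--             out += sub
--     else:
--         out = int(nstr)
--     return out
-- ===== SOURCE B (Python) =====
-- def num_parser(nstr, d):
--     # Single left-to-right character scan with (result, sign, buffer) state
--     # instead of nested split('+')/split('-') passes.
--     if nstr == '':
--         return None
--     if nstr[0] != 'd':
--         return int(nstr)
--     result = 0
--     sign = 1
--     buf = []
--     for ch in nstr + '+':  # trailing '+' flushes the final token
--         if ch == '+' or ch == '-':
--             tok = ''.join(buf)
--             result += sign * (d if tok == 'd' else int(tok))
--             sign = 1 if ch == '+' else -1
--             buf = []
--         else:
--             buf.append(ch)
--     return result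
-- ===== Notes on version B (the rewrite author's own statement) =====
-- stated objective: alternative
-- what changed: Replaced the nested split('+')/split('-') passes and two nested loops by a single left-to-right character scan maintaining (result, sign, token-buffer) state, flushed by a trailing '+' sentinel.
import Mathlib
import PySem

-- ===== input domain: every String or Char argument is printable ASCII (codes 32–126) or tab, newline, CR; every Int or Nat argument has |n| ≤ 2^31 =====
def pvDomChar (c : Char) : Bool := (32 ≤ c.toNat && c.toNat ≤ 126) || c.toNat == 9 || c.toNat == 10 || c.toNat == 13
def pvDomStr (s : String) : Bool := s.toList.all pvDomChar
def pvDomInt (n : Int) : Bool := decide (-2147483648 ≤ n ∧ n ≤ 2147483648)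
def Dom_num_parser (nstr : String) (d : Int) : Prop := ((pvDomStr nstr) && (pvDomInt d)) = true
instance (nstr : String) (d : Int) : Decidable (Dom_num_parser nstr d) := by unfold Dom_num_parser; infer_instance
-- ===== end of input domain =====

-- B replaces the nested split('+')/split('-') passes by a single character scan with
-- (result, sign, buffer) state; same cost, different decomposition. Equivalence is on
-- return values over Pre_ (the inputs where A returns normally).

-- ===== PORT A =====
-- 'for s1 in s0[1:]: sub -= int(s1)'
def aInner (sub : Int) (ts : List (List Char)) : Option Int :=
  match ts with
  | [] => some sub
  | t :: ts' =>
    match PySem.Int.ofChars? t with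
    | none => none                        -- int() raises ValueError
    | some v => aInner (sub - v) ts'

-- 'for s0 in sp: … out += sub'
def aOuter (d : Int) (out : Int) (sp : List (List (List Char))) : Option Int :=
  match sp with
  | [] => some out
  | s0 :: rest =>
    match s0 with
    | [] => none                          -- s0[0] IndexError (unreachable: split is nonempty)
    | h :: t =>
      match (if h = ['d'] then some d else PySem.Int.ofChars? h) with
      | none => none
      | some sub =>
        match aInner sub t with
        | none => none
        | some sub' => aOuter d (out + sub') rest

def num_parser (nstr : String) (d : Int) : Option Int :=
  if nstr.toList = [] then none
  else if PySem.Str.pyGet? nstr 0 = some 'd' then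
    let sp_plus := PySem.Chars.splitOn nstr.toList ['+']
    let sp := sp_plus.map (fun s => PySem.Chars.splitOn s ['-'])
    aOuter d 0 sp
  else PySem.Int.ofChars? nstr.toList

-- ===== PORT B =====
-- the character-level state machine of Source B: state (res, sign, buf)
def bLoop (d : Int) (chars : List Char) (res sign : Int) (buf : List Char) : Option Int :=
  match chars with
  | [] => some res
  | c :: rest =>
    if c = '+' ∨ c = '-' then
      match (if buf = ['d'] then some d else PySem.Int.ofChars? buf) with
      | none => none                      -- int(tok) raises ValueError
      | some v => bLoop d rest (res + sign * v) (if c = '+' then 1 else -1) []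
    else bLoop d rest res sign (buf ++ [c])

def num_parser_alt (nstr : String) (d : Int) : Option Int :=
  if nstr.toList = [] then none
  else if PySem.Str.pyGet? nstr 0 ≠ some 'd' then PySem.Int.ofChars? nstr.toList
  else bLoop d (nstr.toList ++ ['+']) 0 1 []

-- ===== PRECONDITION & SPEC =====
-- Pre_ excludes exactly the inputs where Python A raises ValueError from int():
-- a non-'d…' string that is no integer literal, or a 'd…' expression with a malformed
-- token or with a 'd' token in a non-leading position of a '-'-group.
def preTok (t : List Char) : Bool := (PySem.Int.ofChars? t).isSome

def preGroup (g : List Char) : Bool :=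
  match PySem.Chars.splitOn g ['-'] with
  | [] => true
  | h :: t => (h == ['d'] || preTok h) && t.all preTok

def Pre_num_parser (nstr : String) (d : Int) : Prop :=
  (nstr.toList.isEmpty
   || (if PySem.Str.pyGet? nstr 0 = some 'd'
       then (PySem.Chars.splitOn nstr.toList ['+']).all preGroup
       else preTok nstr.toList)) = true

instance (nstr : String) (d : Int) : Decidable (Pre_num_parser nstr d) := by
  unfold Pre_num_parser; infer_instance

def pvWitness_num_parser : String × Int := ("d+3-2", 5)

def Spec_num_parser (nstr : String) (d : Int) (out : Option Int) : Prop := out = num_parser_alt nstr d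
instance (nstr : String) (d : Int) (out : Option Int) : Decidable (Spec_num_parser nstr d out) := by
  unfold Spec_num_parser; infer_instance

-- ===== CLAIM (what is proved, stated in full; the proofs are below) =====
def Claim_equal_num_parser : Prop := ∀ (nstr : String) (d : Int), Dom_num_parser nstr d → Pre_num_parser nstr d → Spec_num_parser nstr d (num_parser nstr d)

-- ===== LEMMAS AND PROOFS =====

-- proof-side recursive characterisation of split on a single-character separator
def splitOn1 (p : Char) : List Char → List (List Char)
  | [] => [[]]
  | c :: cs =>
    match splitOn1 p cs with
    | [] => []
    | h :: t => if c = p then [] :: h :: t else (c :: h) :: t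

def consHead (pre : List Char) : List (List Char) → List (List Char)
  | [] => []
  | h :: t => (pre ++ h) :: t

lemma splitOn1_ne_nil (p : Char) (l : List Char) : splitOn1 p l ≠ [] := by
  induction l with
  | nil => simp [splitOn1]
  | cons c cs ih =>
    cases h : splitOn1 p cs with
    | nil => exact absurd h ih
    | cons a t => simp only [splitOn1, h]; split <;> simp

lemma go_step (p c : Char) (fuel : Nat) (rest cur : List Char) (acc : List (List Char)) :
    PySem.Chars.splitOn.go [p] (fuel+1) (c :: rest) cur acc
      = if p = c then PySem.Chars.splitOn.go [p] fuel rest [] (cur.reverse :: acc)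
        else PySem.Chars.splitOn.go [p] fuel rest (c :: cur) acc := by
  simp [PySem.Chars.splitOn.go, List.isPrefixOf]

lemma go_eq (p : Char) (fuel : Nat) : ∀ (l cur : List Char) (acc : List (List Char)),
    l.length ≤ fuel →
    PySem.Chars.splitOn.go [p] fuel l cur acc
      = acc.reverse ++ consHead cur.reverse (splitOn1 p l) := by
  induction fuel with
  | zero =>
    intro l cur acc h
    have : l = [] := List.length_eq_zero_iff.mp (Nat.le_zero.mp h)
    subst this
    simp [PySem.Chars.splitOn.go, splitOn1, consHead]
  | succ fuel ih =>
    intro l cur acc h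
    cases l with
    | nil => simp [PySem.Chars.splitOn.go, splitOn1, consHead]
    | cons c rest =>
      simp only [List.length_cons, Nat.add_le_add_iff_right] at h
      rw [go_step]
      by_cases hpc : p = c
      · subst hpc
        rw [if_pos rfl, ih rest [] _ h]
        cases hr : splitOn1 p rest with
        | nil => exact absurd hr (splitOn1_ne_nil p rest)
        | cons a t => simp [splitOn1, hr, consHead]
      · rw [if_neg hpc, ih rest (c :: cur) _ h]
        have hc : ¬ c = p := fun hcp => hpc hcp.symm
        cases hr : splitOn1 p rest with
        | nil => exact absurd hr (splitOn1_ne_nil p rest)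
        | cons a t => simp [splitOn1, hr, consHead, hc]

lemma splitOn_eq_splitOn1 (p : Char) (l : List Char) :
    PySem.Chars.splitOn l [p] = splitOn1 p l := by
  show PySem.Chars.splitOn.go [p] (l.length + 1) l [] [] = _
  rw [go_eq p (l.length + 1) l [] [] (by omega)]
  cases hr : splitOn1 p l with
  | nil => exact absurd hr (splitOn1_ne_nil p l)
  | cons a t => simp [consHead]

lemma splitOn1_of_not_mem {p : Char} {l : List Char} (h : p ∉ l) :
    splitOn1 p l = [l] := by
  induction l with
  | nil => rfl
  | cons c cs ih =>
    simp only [List.mem_cons, not_or] at h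
    have hc : ¬ c = p := fun hcp => h.1 hcp.symm
    simp [splitOn1, ih h.2, hc]

lemma splitOn1_append_of_not_mem {p : Char} {xs : List Char} (ys : List Char) (h : p ∉ xs) :
    splitOn1 p (xs ++ ys) = consHead xs (splitOn1 p ys) := by
  induction xs with
  | nil =>
    cases hy : splitOn1 p ys with
    | nil => exact absurd hy (splitOn1_ne_nil p ys)
    | cons a t => simp [consHead, hy]
  | cons c cs ih =>
    simp only [List.mem_cons, not_or] at h
    simp only [List.cons_append, splitOn1, ih h.2]
    cases hy : splitOn1 p ys with
    | nil => exact absurd hy (splitOn1_ne_nil p ys)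
    | cons a t =>
      have hc : ¬ c = p := fun hcp => h.1 hcp.symm
      simp [consHead, hc]

-- token-level intermediate form
def tokVal (d : Int) (t : List Char) : Option Int :=
  if t = ['d'] then some d else PySem.Int.ofChars? t

def evalToks (d : Int) (res : Int) : List (Int × List Char) → Option Int
  | [] => some res
  | (sg, tok) :: ts =>
    match tokVal d tok with
    | none => none
    | some v => evalToks d (res + sg * v) ts

def signedToks (sign : Int) (buf : List Char) : List Char → List (Int × List Char)
  | [] => [(sign, buf)]
  | c :: cs =>
    if c = '+' then (sign, buf) :: signedToks 1 [] cs
    else if c = '-' then (sign, buf) :: signedToks (-1) [] cs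
    else signedToks sign (buf ++ [c]) cs

def groupToks (g : List Char) : List (Int × List Char) :=
  match splitOn1 '-' g with
  | [] => []
  | h :: t => (1, h) :: t.map (fun x => ((-1 : Int), x))

lemma bLoop_eq_evalToks (d : Int) (cs : List Char) : ∀ (res sign : Int) (buf : List Char),
    bLoop d (cs ++ ['+']) res sign buf = evalToks d res (signedToks sign buf cs) := by
  induction cs with
  | nil =>
    intro res sign buf
    cases h : (if buf = ['d'] then some d else PySem.Int.ofChars? buf) with
    | none => simp [bLoop, signedToks, evalToks, tokVal, h]
    | some v => simp [bLoop, signedToks, evalToks, tokVal, h]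
  | cons c cs ih =>
    intro res sign buf
    by_cases hp : c = '+'
    · subst hp
      cases h : (if buf = ['d'] then some d else PySem.Int.ofChars? buf) with
      | none => simp [bLoop, signedToks, evalToks, tokVal, h]
      | some v =>
        simpa [bLoop, signedToks, evalToks, tokVal, h] using ih (res + sign * v) 1 []
    · by_cases hm : c = '-'
      · subst hm
        cases h : (if buf = ['d'] then some d else PySem.Int.ofChars? buf) with
        | none => simp [bLoop, signedToks, evalToks, tokVal, h, hp]
        | some v =>
          simpa [bLoop, signedToks, evalToks, tokVal, h, hp] using ih (res + sign * v) (-1) []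
      · simpa [bLoop, signedToks, hp, hm] using ih res sign (buf ++ [c])

lemma signedToks_eq (d : Int) (cs : List Char) : ∀ (sign : Int) (buf : List Char), ('-' : Char) ∉ buf →
    signedToks sign buf cs =
      (match splitOn1 '+' cs with
       | [] => []
       | g0 :: gs =>
         (match splitOn1 '-' (buf ++ g0) with
          | [] => []
          | h :: t => (sign, h) :: t.map (fun x => ((-1 : Int), x)))
         ++ gs.flatMap groupToks) := by
  induction cs with
  | nil =>
    intro sign buf hb
    simp [signedToks, splitOn1, splitOn1_of_not_mem hb]
  | cons c cs ih =>
    intro sign buf hb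
    by_cases hp : c = '+'
    · subst hp
      cases hr : splitOn1 '+' cs with
      | nil => exact absurd hr (splitOn1_ne_nil _ _)
      | cons a t =>
        have hih := ih 1 [] (by simp)
        rw [hr] at hih
        simp only [signedToks, hih]
        cases hs : splitOn1 '-' a with
        | nil => exact absurd hs (splitOn1_ne_nil _ _)
        | cons b u =>
          simp [splitOn1, hr, hs, splitOn1_of_not_mem hb, groupToks]
    · by_cases hm : c = '-'
      · subst hm
        cases hr : splitOn1 '+' cs with
        | nil => exact absurd hr (splitOn1_ne_nil _ _)
        | cons a t =>
          have hih := ih (-1) [] (by simp)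
          rw [hr] at hih
          simp only [signedToks, hp, hih]
          cases hs : splitOn1 '-' a with
          | nil => exact absurd hs (splitOn1_ne_nil _ _)
          | cons b u =>
            simp [splitOn1, hr, hs, splitOn1_append_of_not_mem _ hb, consHead, hp]
      · cases hr : splitOn1 '+' cs with
        | nil => exact absurd hr (splitOn1_ne_nil _ _)
        | cons a t =>
          have hb' : ('-' : Char) ∉ buf ++ [c] := by
            simp only [List.mem_append, List.mem_singleton, not_or]
            exact ⟨hb, fun h => hm h.symm⟩
          have hih := ih sign (buf ++ [c]) hb'
          rw [hr] at hih
          simp only [signedToks, hp, hm, hih]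
          simp [splitOn1, hr, hp, List.append_assoc]

lemma inner_eq (d : Int) (t : List (List Char)) :
    (∀ x ∈ t, (PySem.Int.ofChars? x).isSome) →
    ∀ (res sub : Int) (ts : List (Int × List Char)),
    evalToks d (res + sub) (t.map (fun x => ((-1 : Int), x)) ++ ts)
      = match aInner sub t with
        | none => none
        | some s => evalToks d (res + s) ts := by
  induction t with
  | nil => intro _ res sub ts; simp [aInner]
  | cons x t ih =>
    intro hard res sub ts
    obtain ⟨v, hv⟩ := Option.isSome_iff_exists.mp (hard x (by simp))
    have hxd : ¬ x = ['d'] := by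
      intro h
      have hnone : PySem.Int.ofChars? ['d'] = none := by decide
      rw [h, hnone] at hv
      cases hv
    have hrec := ih (fun y hy => hard y (List.mem_cons_of_mem _ hy)) res (sub - v) ts
    simp only [List.map_cons, List.cons_append, evalToks, tokVal, hxd, if_false, hv, aInner]
    rw [show res + sub + (-1) * v = res + (sub - v) by ring]
    exact hrec

lemma outer_eq (d : Int) (gs : List (List Char)) :
    (∀ g ∈ gs, preGroup g = true) → ∀ (out : Int),
    aOuter d out (gs.map (splitOn1 '-')) = evalToks d out (gs.flatMap groupToks) := by
  induction gs with
  | nil => intro _ out; simp [aOuter, evalToks]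
  | cons g gs ih =>
    intro hg out
    have hg0 := hg g (by simp)
    have hgs : ∀ g' ∈ gs, preGroup g' = true := fun g' h' => hg g' (List.mem_cons_of_mem _ h')
    cases hs : splitOn1 '-' g with
    | nil => exact absurd hs (splitOn1_ne_nil _ _)
    | cons h t =>
      have hg0' : ((h == ['d'] || preTok h) && t.all preTok) = true := by
        simpa [preGroup, splitOn_eq_splitOn1, hs] using hg0
      obtain ⟨hh, ht⟩ := Bool.and_eq_true_iff.mp hg0'
      have ht' : ∀ x ∈ t, (PySem.Int.ofChars? x).isSome := by
        intro x hx
        simpa [preTok] using List.all_eq_true.mp ht x hx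
      have hv : ∃ v, (if h = ['d'] then some d else PySem.Int.ofChars? h) = some v := by
        by_cases hd : h = ['d']
        · exact ⟨d, by simp [hd]⟩
        · rcases Option.isSome_iff_exists.mp (by simpa [preTok, hd] using hh) with ⟨v, hv⟩
          exact ⟨v, by simp [hd, hv]⟩
      obtain ⟨v, hv⟩ := hv
      simp only [List.map_cons, aOuter, List.flatMap_cons, List.cons_append, groupToks, hs, hv,
        evalToks, tokVal]
      rw [show out + 1 * v = out + v by ring]
      have hinner := inner_eq d t ht' out v (gs.flatMap groupToks)
      rw [hinner]
      cases ha : aInner v t with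
      | none => rfl
      | some s => exact ih hgs (out + s)

-- ===== VERDICT (by name: the statement is the Claim_ definition above) =====
theorem num_parser_spec : Claim_equal_num_parser := by
  intro nstr d hDom hPre
  unfold Spec_num_parser num_parser num_parser_alt
  by_cases hnil : nstr.toList = []
  · simp [hnil]
  · by_cases hd : PySem.Str.pyGet? nstr 0 = some 'd'
    · simp only [hnil, hd, ne_eq, not_true_eq_false, if_false, if_true]
      rw [bLoop_eq_evalToks, signedToks_eq d nstr.toList 1 [] (by simp)]
      unfold Pre_num_parser at hPre
      have hie : nstr.toList.isEmpty = false := by simp [hnil]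
      simp only [hie, hd, if_true, Bool.false_or] at hPre
      simp only [splitOn_eq_splitOn1] at hPre ⊢
      cases hr : splitOn1 '+' nstr.toList with
      | nil => exact absurd hr (splitOn1_ne_nil _ _)
      | cons g0 gs =>
        rw [hr] at hPre
        have hGroups : ∀ g ∈ g0 :: gs, preGroup g = true := by
          intro g hgm
          exact List.all_eq_true.mp hPre g hgm
        rw [outer_eq d (g0 :: gs) hGroups 0]
        simp only [List.nil_append]
        cases hs : splitOn1 '-' g0 with
        | nil => exact absurd hs (splitOn1_ne_nil _ _)
        | cons b u => simp [groupToks, hs]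
    · have hdl : ¬ PySem.List.pyGet? nstr.toList 0 = some 'd' := by simpa using hd
      simp [hnil, hdl]
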